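-- pv_equiv track=rewrite | github.com/mne-tools/mne-lsl | StreamReceiver/stream_receiver.py | find_trigger_channel
-- ===== SOURCE A (Python) =====
-- def find_trigger_channel(ch_list):
--     if 'TRIGGER' in ch_list:
--         return ch_list.index('TRIGGER')
--     elif 'TRG' in ch_list:
--         return ch_list.index('TRG')
--     else:
--         for i, chn in enumerate(ch_list):
--             if chn is None:
--                 continue
--             # usually STI 014 for many trigger boxes
--             if 'STI ' in chn:
--                 return i
--         return None
-- ===== SOURCE B (Python) =====
-- def find_trigger_channel(ch_list):
--     # single pass keeping the first TRG and first 'STI ' candidates; 'TRIGGER' returns immediately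
--     idx_trg = None
--     idx_sti = None
--     for i, chn in enumerate(ch_list):
--         if chn == 'TRIGGER':
--             return i
--         if idx_trg is None and chn == 'TRG':
--             idx_trg = i
--         if idx_sti is None and chn is not None and 'STI ' in chn:
--             idx_sti = i
--     return idx_trg if idx_trg is not None else idx_sti
-- ===== Notes on version B (the rewrite author's own statement) =====
-- stated objective: alternative
-- what changed: Replaces A's three separate scans ('TRIGGER' in + index, 'TRG' in + index, STI loop) with one enumerate pass keeping first-TRG and first-'STI ' candidates and short-circuiting on 'TRIGGER'.
import Mathlib
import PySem

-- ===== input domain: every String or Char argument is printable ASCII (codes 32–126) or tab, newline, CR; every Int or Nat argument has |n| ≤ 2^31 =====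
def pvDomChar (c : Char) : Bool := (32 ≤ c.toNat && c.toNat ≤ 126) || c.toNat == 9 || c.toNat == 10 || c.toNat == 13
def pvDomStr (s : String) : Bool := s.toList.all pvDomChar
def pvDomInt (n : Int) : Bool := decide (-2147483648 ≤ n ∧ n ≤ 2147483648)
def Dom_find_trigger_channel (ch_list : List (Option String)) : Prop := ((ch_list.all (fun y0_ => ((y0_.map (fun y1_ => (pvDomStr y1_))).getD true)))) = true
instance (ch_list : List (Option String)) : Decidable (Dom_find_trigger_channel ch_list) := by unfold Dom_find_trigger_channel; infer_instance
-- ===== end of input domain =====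

-- B replaces A's separate membership/index scans and STI loop by one enumerate pass keeping
-- first-TRG and first-'STI ' candidates (alternative decomposition, same asymptotic cost).

-- ===== PORT A =====
-- the for-loop of A's else branch: first index whose element is non-None and contains 'STI '
def ftcLoopA (i : Int) : List (Option String) → Option Int
  | [] => none
  | none :: rest => ftcLoopA (i + 1) rest
  | some s :: rest => if PySem.Str.isIn "STI " s then some i else ftcLoopA (i + 1) rest

def find_trigger_channel (ch_list : List (Option String)) : Option Int :=
  if some "TRIGGER" ∈ ch_list then
    (PySem.List.index? ch_list (some "TRIGGER")).map (fun k => (k : Int))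
  else if some "TRG" ∈ ch_list then
    (PySem.List.index? ch_list (some "TRG")).map (fun k => (k : Int))
  else ftcLoopA 0 ch_list

-- ===== PORT B =====
-- Source B's single loop: state (idx_trg, idx_sti); early return on 'TRIGGER'
def ftcLoopB (i : Int) (trg sti : Option Int) : List (Option String) → Option Int
  | [] => match trg with | some t => some t | none => sti
  | chn :: rest =>
    if chn = some "TRIGGER" then some i
    else
      ftcLoopB (i + 1)
        (if trg == none && chn == some "TRG" then some i else trg)
        (if sti == none && (match chn with | some s => PySem.Str.isIn "STI " s | none => false)
         then some i else sti)
        rest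

def find_trigger_channel_alt (ch_list : List (Option String)) : Option Int :=
  ftcLoopB 0 none none ch_list

-- ===== PRECONDITION & SPEC =====
def Spec_find_trigger_channel (ch_list : List (Option String)) (out : Option Int) : Prop := out = find_trigger_channel_alt ch_list
instance (ch_list : List (Option String)) (out : Option Int) : Decidable (Spec_find_trigger_channel ch_list out) := by unfold Spec_find_trigger_channel; infer_instance

-- ===== CLAIM (what is proved, stated in full; the proofs are below) =====
def Claim_equal_find_trigger_channel : Prop := ∀ (ch_list : List (Option String)), Dom_find_trigger_channel ch_list → Spec_find_trigger_channel ch_list (find_trigger_channel ch_list)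

-- ===== LEMMAS AND PROOFS =====

-- closed description of B's loop: first TRIGGER wins, else carried trg, else first TRG,
-- else carried sti, else A's STI scan
def ftcSpecB (i : Int) (trg sti : Option Int) (l : List (Option String)) : Option Int :=
  if some "TRIGGER" ∈ l then some (i + (l.idxOf (some "TRIGGER") : Int))
  else match trg with
    | some t => some t
    | none =>
      if some "TRG" ∈ l then some (i + (l.idxOf (some "TRG") : Int))
      else match sti with
        | some s => some s
        | none => ftcLoopA i l

lemma ftcLoopB_eq_spec (l : List (Option String)) :
    ∀ (i : Int) (trg sti : Option Int), ftcLoopB i trg sti l = ftcSpecB i trg sti l := by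
  induction l with
  | nil =>
    intro i trg sti
    cases trg <;> cases sti <;> simp [ftcLoopB, ftcSpecB, ftcLoopA]
  | cons hd tl ih =>
    intro i trg sti
    by_cases htrig : hd = some "TRIGGER"
    · subst htrig
      simp [ftcLoopB, ftcSpecB, List.idxOf_cons_self]
    · rw [ftcLoopB.eq_def]; simp only [if_neg htrig]; rw [ih]
      by_cases hmemT : some "TRIGGER" ∈ tl
      · have hmem : some "TRIGGER" ∈ hd :: tl := List.mem_cons_of_mem _ hmemT
        have hidx : ((hd :: tl).idxOf (some "TRIGGER") : Int)
            = (tl.idxOf (some "TRIGGER") : Int) + 1 := by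
          simp [htrig]
        simp only [ftcSpecB, if_pos hmemT, if_pos hmem, hidx]
        exact congrArg some (by omega)
      · have hmem : some "TRIGGER" ∉ hd :: tl := fun hc =>
          (List.mem_cons.mp hc).elim (fun h => htrig (Eq.symm h)) hmemT
        simp only [ftcSpecB, if_neg hmemT, if_neg hmem]
        cases trg with
        | some t => simp
        | none =>
          by_cases htrg : hd = some "TRG"
          · subst htrg
            simp [List.idxOf_cons_self, List.mem_cons]
          · have htrgb : (hd == some "TRG") = false := by simp [htrg]
            by_cases hmemG : some "TRG" ∈ tl
            · have hmemG' : some "TRG" ∈ hd :: tl := List.mem_cons_of_mem _ hmemG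
              have hidx : ((hd :: tl).idxOf (some "TRG") : Int)
                  = (tl.idxOf (some "TRG") : Int) + 1 := by
                simp [htrg]
              simp only [if_pos hmemG', hidx, htrgb, Bool.and_false,
                Bool.false_eq_true, if_false, if_pos hmemG]
              exact congrArg some (by omega)
            · have hmemG' : some "TRG" ∉ hd :: tl := fun hc =>
                (List.mem_cons.mp hc).elim (fun h => htrg (Eq.symm h)) hmemG
              simp only [if_neg hmemG, if_neg hmemG', htrgb, Bool.and_false]
              simp only [Bool.false_eq_true, if_false]
              cases sti with
              | some s => simp
              | none =>
                cases hd with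
                | none => simp [ftcLoopA]
                | some s =>
                  by_cases hsti : PySem.Chars.isIn ['S', 'T', 'I', ' '] s.toList = true
                  · simp [ftcLoopA, PySem.Str.isIn, hsti]
                  · simp [ftcLoopA, PySem.Str.isIn, hsti]

lemma index?_of_mem {x : Option String} {l : List (Option String)} (h : x ∈ l) :
    PySem.List.index? l x = some (l.idxOf x) := by
  induction l with
  | nil => cases h
  | cons hd tl ih =>
    by_cases hx : hd = x
    · subst hx
      rw [PySem.List.index?_cons_self, List.idxOf_cons_self]
    · have hmem : x ∈ tl := by
        rcases List.mem_cons.mp h with h' | h'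
        · exact absurd h'.symm hx
        · exact h'
      rw [PySem.List.index?_cons_of_ne tl hx, ih hmem]
      simp [hx]

-- ===== VERDICT (by name: the statement is the Claim_ definition above) =====
theorem find_trigger_channel_spec : Claim_equal_find_trigger_channel := by
  intro ch_list _
  unfold Spec_find_trigger_channel find_trigger_channel find_trigger_channel_alt
  rw [ftcLoopB_eq_spec]
  unfold ftcSpecB
  by_cases h1 : some "TRIGGER" ∈ ch_list
  · rw [if_pos h1, if_pos h1, index?_of_mem h1]
    simp
  · by_cases h2 : some "TRG" ∈ ch_list
    · rw [if_neg h1, if_neg h1, if_pos h2, if_pos h2, index?_of_mem h2]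
      simp
    · simp [h1, h2]
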